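-- pv_equiv track=rewrite | github.com/paulorodriguesxv/python-trading-utilities | nota_bovespa_modal.py | group_by_trade_type
-- ===== SOURCE A (Python) =====
-- def filter_compra(x):
--     return x["tipoOperacao"] == 'C'
--
-- def filter_venda(x):
--     return x["tipoOperacao"] == 'V'
--
-- def group_by_trade_type(trade_list):
--     trades = []
--     for daily_trades in trade_list.values():
--         for trade in daily_trades:
--             trades.append(trade)
--
--     compras = list(filter(filter_compra, trades))
--     vendas = list(filter(filter_venda, trades))
--
--     return {'C': compras, 'V': vendas}
-- ===== SOURCE B (Python) =====
-- def group_by_trade_type(trade_list):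
--     compras = []
--     vendas = []
--     for daily_trades in trade_list.values():
--         for trade in daily_trades:
--             tipo = trade["tipoOperacao"]
--             if tipo == 'C':
--                 compras.append(trade)
--             elif tipo == 'V':
--                 vendas.append(trade)
--     return {'C': compras, 'V': vendas}
-- ===== Notes on version B (the rewrite author's own statement) =====
-- stated objective: alternative
-- what changed: Replaces the flatten-then-two-filter-passes structure with a single classifying pass that appends each trade directly to compras or vendas, never materializing the flattened list (three scans become one).
import Mathlib
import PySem

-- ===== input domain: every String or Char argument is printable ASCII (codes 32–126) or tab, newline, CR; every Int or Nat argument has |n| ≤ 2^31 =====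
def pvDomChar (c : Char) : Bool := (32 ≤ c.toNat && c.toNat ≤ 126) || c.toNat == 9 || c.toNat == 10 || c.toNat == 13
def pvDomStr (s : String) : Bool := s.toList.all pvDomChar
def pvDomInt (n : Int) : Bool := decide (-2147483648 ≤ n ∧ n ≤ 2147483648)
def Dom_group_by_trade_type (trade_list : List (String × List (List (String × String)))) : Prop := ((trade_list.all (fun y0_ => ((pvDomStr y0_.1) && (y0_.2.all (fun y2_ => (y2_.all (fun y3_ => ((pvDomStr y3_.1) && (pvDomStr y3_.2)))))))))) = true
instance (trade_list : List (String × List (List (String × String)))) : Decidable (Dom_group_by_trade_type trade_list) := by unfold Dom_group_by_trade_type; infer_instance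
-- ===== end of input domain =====

-- B replaces A's flatten-then-two-filter-passes with one classifying pass (same result, fewer passes).

-- first-match association lookup, = Python trade["tipoOperacao"] when the key exists (Pre_ guarantees it)
def pvTipo (trade : List (String × String)) : Option String :=
  (trade.find? (fun p => p.1 == "tipoOperacao")).map Prod.snd

-- ===== PORT A =====
def group_by_trade_type (trade_list : List (String × List (List (String × String)))) : List (String × List (List (String × String))) :=
  -- trades = []; for daily_trades in trade_list.values(): for trade in daily_trades: trades.append(trade)
  let trades := trade_list.foldl (fun acc p => p.2.foldl (fun a t => a ++ [t]) acc) []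
  let compras := trades.filter (fun t => pvTipo t == some "C")
  let vendas := trades.filter (fun t => pvTipo t == some "V")
  [("C", compras), ("V", vendas)]

-- ===== PORT B =====
def group_by_trade_type_alt (trade_list : List (String × List (List (String × String)))) : List (String × List (List (String × String))) :=
  let cv := trade_list.foldl
    (fun acc p => p.2.foldl
      (fun (cv : List (List (String × String)) × List (List (String × String))) t =>
        let tipo := pvTipo t
        if tipo == some "C" then (cv.1 ++ [t], cv.2)
        else if tipo == some "V" then (cv.1, cv.2 ++ [t])
        else cv) acc)
    ([], [])
  [("C", cv.1), ("V", cv.2)]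

-- ===== PRECONDITION & SPEC =====
-- Pre_ excludes exactly the inputs where some trade dict lacks the key "tipoOperacao": there Python A (and B) raises KeyError.
def Pre_group_by_trade_type (trade_list : List (String × List (List (String × String)))) : Prop :=
  (trade_list.all (fun p => p.2.all (fun t => (pvTipo t).isSome))) = true
instance (trade_list : List (String × List (List (String × String)))) : Decidable (Pre_group_by_trade_type trade_list) := by unfold Pre_group_by_trade_type; infer_instance
def pvWitness_group_by_trade_type : (List (String × List (List (String × String)))) :=
  [("2021-01-04", [[("tipoOperacao", "C"), ("ativo", "PETR4")], [("tipoOperacao", "V")]]),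
   ("2021-01-05", [[("tipoOperacao", "X")]])]
def Spec_group_by_trade_type (trade_list : List (String × List (List (String × String)))) (out : List (String × List (List (String × String)))) : Prop := out = group_by_trade_type_alt trade_list
instance (trade_list : List (String × List (List (String × String)))) (out : List (String × List (List (String × String)))) : Decidable (Spec_group_by_trade_type trade_list out) := by unfold Spec_group_by_trade_type; infer_instance

-- ===== CLAIM (what is proved, stated in full; the proofs are below) =====
def Claim_equal_group_by_trade_type : Prop := ∀ (trade_list : List (String × List (List (String × String)))), Dom_group_by_trade_type trade_list → Pre_group_by_trade_type trade_list → Spec_group_by_trade_type trade_list (group_by_trade_type trade_list)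

-- ===== LEMMAS AND PROOFS =====

theorem pv_append_fold (ts : List (List (String × String)))
    (acc : List (List (String × String))) :
    ts.foldl (fun a t => a ++ [t]) acc = acc ++ ts := by
  induction ts generalizing acc with
  | nil => simp
  | cons t ts ih => simp [List.foldl_cons, ih]

theorem pv_inner_fold (ts : List (List (String × String)))
    (c v : List (List (String × String))) :
    ts.foldl
      (fun (cv : List (List (String × String)) × List (List (String × String))) t =>
        let tipo := pvTipo t
        if tipo == some "C" then (cv.1 ++ [t], cv.2)
        else if tipo == some "V" then (cv.1, cv.2 ++ [t])
        else cv) (c, v)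
    = (c ++ ts.filter (fun t => pvTipo t == some "C"),
       v ++ ts.filter (fun t => pvTipo t == some "V")) := by
  induction ts generalizing c v with
  | nil => simp
  | cons t ts ih =>
    by_cases hc : pvTipo t == some "C"
    · have hv : (pvTipo t == some "V") = false := by
        cases h : pvTipo t == some "V"
        · rfl
        · exfalso
          have := eq_of_beq hc; have := eq_of_beq h; simp_all
      simp only [List.foldl_cons, List.filter_cons, hc, hv, Bool.false_eq_true, if_true, if_false, ih]
      simp
    · by_cases hv : pvTipo t == some "V"
      · simp only [List.foldl_cons, List.filter_cons, hc, hv, Bool.false_eq_true, if_true, if_false, ih]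
        simp
      · have hc' : (pvTipo t == some "C") = false := by simpa using hc
        have hv' : (pvTipo t == some "V") = false := by simpa using hv
        simp only [List.foldl_cons, List.filter_cons, hc', hv', Bool.false_eq_true, if_false, ih]

theorem pv_outer_fold (l : List (String × List (List (String × String))))
    (c v : List (List (String × String))) :
    l.foldl
      (fun acc p => p.2.foldl
        (fun (cv : List (List (String × String)) × List (List (String × String))) t =>
          let tipo := pvTipo t
          if tipo == some "C" then (cv.1 ++ [t], cv.2)
          else if tipo == some "V" then (cv.1, cv.2 ++ [t])
          else cv) acc) (c, v)
    = (c ++ (l.flatMap Prod.snd).filter (fun t => pvTipo t == some "C"),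
       v ++ (l.flatMap Prod.snd).filter (fun t => pvTipo t == some "V")) := by
  induction l generalizing c v with
  | nil => simp
  | cons p l ih =>
    simp only [List.foldl_cons, pv_inner_fold, ih, List.flatMap_cons, List.filter_append,
      List.append_assoc]

theorem pv_flatten (l : List (String × List (List (String × String))))
    (acc : List (List (String × String))) :
    l.foldl (fun acc p => p.2.foldl (fun a t => a ++ [t]) acc) acc
    = acc ++ l.flatMap Prod.snd := by
  induction l generalizing acc with
  | nil => simp
  | cons p l ih =>
    rw [List.foldl_cons, pv_append_fold, ih]
    simp [List.flatMap_cons]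

-- ===== VERDICT (by name: the statement is the Claim_ definition above) =====
theorem group_by_trade_type_spec : Claim_equal_group_by_trade_type := by
  intro trade_list _ _
  show _ = _
  simp only [group_by_trade_type, group_by_trade_type_alt, pv_flatten, pv_outer_fold,
    List.nil_append]
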